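-- pv_equiv track=rewrite | github.com/sigurd93/led_tsetlin | tm_hyptune.py | index_sentence
-- ===== SOURCE A (Python) =====
-- def index_sentence(sentence, keyword):
--     words = sentence.split()
--     index = {}
--     found_keyword = False
--     for i in range(len(words)):
--         if words[i] == keyword:
--             found_keyword = True
--         if found_keyword:
--             index[words[i]] = i - len(words)
--         else:
--             index[words[i]] = i
--     return index
-- ===== SOURCE B (Python) =====
-- def index_sentence(sentence, keyword):
--     words = sentence.split()
--     n = len(words)
--     index = dict(zip(words, range(n)))
--     if keyword in index:
--         for w in dict.fromkeys(words[words.index(keyword):]):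
--             index[w] -= n
--     return index
-- ===== Notes on version B (the rewrite author's own statement) =====
-- stated objective: alternative
-- what changed: B replaces A's single flag-threading pass by two stages: it builds the whole dict with positive indices at once via dict(zip(words, range(n))) and then, only if the keyword is present, subtracts n in place from the entry of each distinct word occurring from the keyword's first position on.
import Mathlib
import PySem

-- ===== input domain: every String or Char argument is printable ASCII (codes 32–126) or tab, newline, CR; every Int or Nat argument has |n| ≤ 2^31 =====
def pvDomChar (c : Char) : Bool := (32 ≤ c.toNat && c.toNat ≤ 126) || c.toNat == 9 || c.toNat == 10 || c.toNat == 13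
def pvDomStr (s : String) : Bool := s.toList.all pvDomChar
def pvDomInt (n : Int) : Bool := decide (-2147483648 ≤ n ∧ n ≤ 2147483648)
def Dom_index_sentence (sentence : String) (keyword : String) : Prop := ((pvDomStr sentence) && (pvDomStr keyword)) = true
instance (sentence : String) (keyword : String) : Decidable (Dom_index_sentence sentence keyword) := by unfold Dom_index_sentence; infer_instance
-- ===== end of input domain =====

-- B builds the whole dict with positive indices at once via dict(zip(words, range(n))) and then,
-- in a second pass, subtracts n from the entry of every distinct word occurring at or after the
-- first keyword occurrence — instead of A's single pass that threads a found_keyword flag and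
-- chooses the sign per element (objective: alternative decomposition).

-- ===== PORT A =====
-- the for-loop of A: state = (dict, found_keyword flag), one step per word (i is the running index)
def pvLoopA (keyword : String) (n : Int) : List String → Int → Bool → PySem.Dict String Int → PySem.Dict String Int
  | [], _, _, d => d
  | w :: rest, i, found, d =>
    let found' := found || (w == keyword)
    let d' := if found' then d.insert w (i - n) else d.insert w i
    pvLoopA keyword n rest (i + 1) found' d'

def index_sentence (sentence : String) (keyword : String) : List (String × Int) :=
  (pvLoopA keyword ((PySem.Str.split₀ sentence).length : Int)
    (PySem.Str.split₀ sentence) 0 false PySem.Dict.empty).items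

-- ===== PORT B =====
def index_sentence_alt (sentence : String) (keyword : String) : List (String × Int) :=
  let words := PySem.Str.split₀ sentence
  let n : Int := (words.length : Int)
  -- index = dict(zip(words, range(n)))
  let index := PySem.Dict.ofList (words.zip (PySem.List.pyRange 0 n 1))
  if index.contains keyword then
    -- guarded by the membership test, words.index(keyword) cannot raise; index? is some here
    let k : Nat := (PySem.List.index? words keyword).getD 0
    -- for w in dict.fromkeys(words[k:]): index[w] -= n
    ((PySem.List.dedup (PySem.List.slice words (some (k : Int)) none)).foldl
        (fun d w => d.modify w 0 (fun v => v - n)) index).items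
  else
    index.items

-- ===== PRECONDITION & SPEC =====
def Spec_index_sentence (sentence : String) (keyword : String) (out : List (String × Int)) : Prop := out = index_sentence_alt sentence keyword
instance (sentence : String) (keyword : String) (out : List (String × Int)) : Decidable (Spec_index_sentence sentence keyword out) := by unfold Spec_index_sentence; infer_instance

-- ===== CLAIM (what is proved, stated in full; the proofs are below) =====
def Claim_equal_index_sentence : Prop := ∀ (sentence : String) (keyword : String), Dom_index_sentence sentence keyword → Spec_index_sentence sentence keyword (index_sentence sentence keyword)

-- ===== LEMMAS AND PROOFS =====

-- proof-side bridge: A's loop once the boundary k (first keyword index, n if absent) is fixed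
def pvLoopB (k : Int) (n : Int) : List String → Int → PySem.Dict String Int → PySem.Dict String Int
  | [], _, d => d
  | w :: rest, i, d => pvLoopB k n rest (i + 1) (d.insert w (if i ≥ k then i - n else i))

def pvBoundary (words : List String) (keyword : String) : Int :=
  (PySem.List.index? words keyword).elim (words.length : Int) (fun m => (m : Int))

-- proof-side bridge: the positive-index fold (what dict(zip(words, range(n))) computes)
def pvPos : List String → Int → PySem.Dict String Int → PySem.Dict String Int
  | [], _, d => d
  | w :: rest, i, d => pvPos rest (i + 1) (d.insert w i)

-- index of the LAST occurrence of w in ws, counting from i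
def pvLastIdx? : List String → Int → String → Option Int
  | [], _, _ => none
  | x :: rest, i, w =>
    match pvLastIdx? rest (i + 1) w with
    | some j => some j
    | none => if w = x then some i else none

-- ---- A = pvLoopB (boundary form) ----

lemma loopA_true_eq (keyword : String) (n : Int) :
    ∀ (ws : List String) (i k : Int) (d : PySem.Dict String Int), k ≤ i →
      pvLoopA keyword n ws i true d = pvLoopB k n ws i d := by
  intro ws
  induction ws with
  | nil => intro i k d _; rfl
  | cons w rest ih =>
    intro i k d hk
    simp only [pvLoopA, pvLoopB, Bool.true_or, if_pos trivial, ge_iff_le, if_pos hk]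
    exact ih (i + 1) k _ (by omega)

lemma pvBoundary_nonneg (ws : List String) (kw : String) : 0 ≤ pvBoundary ws kw := by
  unfold pvBoundary
  cases PySem.List.index? ws kw <;> simp [Option.elim]

lemma pvBoundary_cons_self (rest : List String) (kw : String) :
    pvBoundary (kw :: rest) kw = 0 := by
  unfold pvBoundary
  rw [PySem.List.index?_cons_self]
  rfl

lemma pvBoundary_cons_of_ne {w kw : String} (rest : List String) (hne : w ≠ kw) :
    pvBoundary (w :: rest) kw = pvBoundary rest kw + 1 := by
  unfold pvBoundary
  rw [PySem.List.index?_cons_of_ne rest hne]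
  cases PySem.List.index? rest kw <;> simp [Option.elim]

lemma loopA_false_eq (keyword : String) (n : Int) :
    ∀ (ws : List String) (i : Int) (d : PySem.Dict String Int),
      pvLoopA keyword n ws i false d = pvLoopB (i + pvBoundary ws keyword) n ws i d := by
  intro ws
  induction ws with
  | nil => intro i d; rfl
  | cons w rest ih =>
    intro i d
    by_cases hw : w = keyword
    · rw [hw, pvBoundary_cons_self, add_zero]
      simp only [pvLoopA, pvLoopB, Bool.false_or, beq_self_eq_true, if_pos trivial,
        ge_iff_le, le_refl]
      exact loopA_true_eq keyword n rest (i + 1) i _ (by omega)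
    · have hbe : (w == keyword) = false := beq_eq_false_iff_ne.mpr hw
      rw [pvBoundary_cons_of_ne rest hw]
      have hb := pvBoundary_nonneg rest keyword
      have hcond : ¬ (i ≥ i + (pvBoundary rest keyword + 1)) := by omega
      simp only [pvLoopA, pvLoopB, hbe, Bool.false_or, Bool.false_eq_true, if_neg hcond]
      have := ih (i + 1) (d.insert w i)
      rw [show i + (pvBoundary rest keyword + 1) = i + 1 + pvBoundary rest keyword by ring]
      exact this

-- ---- keys of the three dict-building loops ----

lemma keys_insert_eq_add (d : PySem.Dict String Int) (w : String) (v : Int) :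
    (d.insert w v).keys = PySem.Set.add d.keys w := by
  by_cases h : d.contains w = true
  · rw [PySem.Dict.keys_insert_of_contains d v h]
    have hm : w ∈ d.keys := (PySem.Dict.contains_iff_mem_keys d w).1 h
    simp [PySem.Set.add, PySem.Set.contains, hm]
  · have hf : d.contains w = false := by revert h; cases d.contains w <;> simp
    rw [PySem.Dict.keys_insert_of_not_contains d v hf]
    have hm : w ∉ d.keys := fun hm => by
      rw [(PySem.Dict.contains_iff_mem_keys d w).2 hm] at hf; cases hf
    simp [PySem.Set.add, PySem.Set.contains, hm]

lemma keys_pvPos : ∀ (ws : List String) (i : Int) (d : PySem.Dict String Int),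
    (pvPos ws i d).keys = PySem.Set.update d.keys ws := by
  intro ws
  induction ws with
  | nil => intro i d; simp [pvPos, PySem.Set.update_nil]
  | cons w rest ih =>
    intro i d
    rw [PySem.Set.update_cons, ← keys_insert_eq_add d w i]
    exact ih (i + 1) _

lemma keys_pvLoopB (k n : Int) : ∀ (ws : List String) (i : Int) (d : PySem.Dict String Int),
    (pvLoopB k n ws i d).keys = PySem.Set.update d.keys ws := by
  intro ws
  induction ws with
  | nil => intro i d; simp [pvLoopB, PySem.Set.update_nil]
  | cons w rest ih =>
    intro i d
    rw [pvLoopB, PySem.Set.update_cons, ← keys_insert_eq_add d w _]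
    exact ih (i + 1) _

lemma set_add_of_mem {s : PySem.Set String} {x : String} (h : x ∈ s) :
    PySem.Set.add s x = s := by
  simp [PySem.Set.add, PySem.Set.contains, h]

lemma set_update_of_subset : ∀ (l : List String) (s : PySem.Set String),
    (∀ x ∈ l, x ∈ s) → PySem.Set.update s l = s := by
  intro l
  induction l with
  | nil => intro s _; exact PySem.Set.update_nil s
  | cons x rest ih =>
    intro s h
    rw [PySem.Set.update_cons, set_add_of_mem (h x (by simp))]
    exact ih s (fun y hy => h y (by simp [hy]))

-- ---- getD characterisations ----

lemma pvLastIdx?_cons_some {rest : List String} {i : Int} {w : String} {j : Int}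
    (x : String) (h : pvLastIdx? rest (i + 1) w = some j) :
    pvLastIdx? (x :: rest) i w = some j := by
  simp [pvLastIdx?, h]

lemma pvLastIdx?_cons_none {rest : List String} {i : Int} {w : String}
    (x : String) (h : pvLastIdx? rest (i + 1) w = none) :
    pvLastIdx? (x :: rest) i w = if w = x then some i else none := by
  simp [pvLastIdx?, h]

lemma getD_pvPos : ∀ (ws : List String) (i : Int) (d : PySem.Dict String Int) (w : String),
    (pvPos ws i d).getD w 0 = (pvLastIdx? ws i w).elim (d.getD w 0) id := by
  intro ws
  induction ws with
  | nil => intro i d w; rfl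
  | cons x rest ih =>
    intro i d w
    rw [pvPos, ih (i + 1) _ w]
    cases h : pvLastIdx? rest (i + 1) w with
    | some j => rw [pvLastIdx?_cons_some x h]; rfl
    | none =>
      rw [pvLastIdx?_cons_none x h]
      simp only [PySem.Dict.getD_insert, Option.elim]
      by_cases hw : w = x <;> simp [hw]

lemma getD_pvLoopB (k n : Int) :
    ∀ (ws : List String) (i : Int) (d : PySem.Dict String Int) (w : String),
    (pvLoopB k n ws i d).getD w 0
      = (pvLastIdx? ws i w).elim (d.getD w 0) (fun j => if k ≤ j then j - n else j) := by
  intro ws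
  induction ws with
  | nil => intro i d w; rfl
  | cons x rest ih =>
    intro i d w
    rw [pvLoopB, ih (i + 1) _ w]
    cases h : pvLastIdx? rest (i + 1) w with
    | some j => rw [pvLastIdx?_cons_some x h]; rfl
    | none =>
      rw [pvLastIdx?_cons_none x h]
      simp only [PySem.Dict.getD_insert, Option.elim, ge_iff_le]
      by_cases hw : w = x <;> simp [hw]

lemma getD_modifyFold (n : Int) : ∀ (l : List String), l.Nodup →
    ∀ (d : PySem.Dict String Int) (w : String),
    (l.foldl (fun d x => d.modify x 0 (fun v => v - n)) d).getD w 0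
      = if w ∈ l then d.getD w 0 - n else d.getD w 0 := by
  intro l
  induction l with
  | nil => intro _ d w; simp
  | cons x rest ih =>
    intro hnd d w
    have hx : x ∉ rest := (List.nodup_cons.1 hnd).1
    rw [List.foldl_cons, ih (List.nodup_cons.1 hnd).2 _ w, PySem.Dict.getD_modify]
    by_cases hr : w ∈ rest
    · have hwx : ¬ w = x := fun h => hx (h ▸ hr)
      simp [hr, hwx]
    · by_cases hwx : w = x
      · subst hwx
        rw [if_neg hr, if_pos rfl, if_pos (List.mem_cons_self)]
      · simp [hr, hwx]

-- ---- facts about pvLastIdx? ----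

lemma pvLastIdx?_eq_none_iff : ∀ (ws : List String) (i : Int) (w : String),
    pvLastIdx? ws i w = none ↔ w ∉ ws := by
  intro ws
  induction ws with
  | nil => intro i w; simp [pvLastIdx?]
  | cons x rest ih =>
    intro i w
    cases h : pvLastIdx? rest (i + 1) w with
    | some j =>
      have hm : w ∈ rest := by
        by_contra hm
        rw [(ih (i + 1) w).2 hm] at h; cases h
      rw [pvLastIdx?_cons_some x h]
      simp [hm]
    | none =>
      have hm : w ∉ rest := (ih (i + 1) w).1 h
      rw [pvLastIdx?_cons_none x h]
      by_cases hw : w = x <;> simp [hw, hm]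

lemma pvLastIdx?_bounds : ∀ (ws : List String) (i : Int) (w : String) (j : Int),
    pvLastIdx? ws i w = some j → i ≤ j ∧ j < i + ws.length := by
  intro ws
  induction ws with
  | nil => intro i w j h; cases h
  | cons x rest ih =>
    intro i w j h
    cases hr : pvLastIdx? rest (i + 1) w with
    | some j' =>
      rw [pvLastIdx?_cons_some x hr] at h
      obtain rfl : j' = j := Option.some.inj h
      have hb := ih (i + 1) w j' hr
      refine ⟨by omega, ?_⟩
      simp only [List.length_cons]; push_cast; omega
    | none =>
      rw [pvLastIdx?_cons_none x hr] at h
      by_cases hw : w = x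
      · rw [if_pos hw] at h
        obtain rfl : i = j := Option.some.inj h
        refine ⟨le_refl _, ?_⟩
        simp only [List.length_cons]; push_cast; omega
      · rw [if_neg hw] at h; cases h

lemma pvLastIdx?_drop : ∀ (ws : List String) (i : Int) (w : String) (j : Int) (kk : Nat),
    pvLastIdx? ws i w = some j → (w ∈ ws.drop kk ↔ i + (kk : Int) ≤ j) := by
  intro ws
  induction ws with
  | nil => intro i w j kk h; cases h
  | cons x rest ih =>
    intro i w j kk h
    cases kk with
    | zero =>
      have hb := pvLastIdx?_bounds _ i w j h
      have hm : w ∈ x :: rest := by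
        by_contra hm
        rw [(pvLastIdx?_eq_none_iff _ i w).2 hm] at h; cases h
      simp only [List.drop_zero]
      constructor
      · intro _; push_cast; omega
      · intro _; exact hm
    | succ kk =>
      cases hr : pvLastIdx? rest (i + 1) w with
      | some j' =>
        rw [pvLastIdx?_cons_some x hr] at h
        obtain rfl : j' = j := Option.some.inj h
        have hiff := ih (i + 1) w j' kk hr
        rw [List.drop_succ_cons, hiff]
        push_cast
        omega
      | none =>
        rw [pvLastIdx?_cons_none x hr] at h
        by_cases hw : w = x
        · rw [if_pos hw] at h
          injection h with h2
          subst h2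
          have hm : w ∉ rest := (pvLastIdx?_eq_none_iff rest (i + 1) w).1 hr
          rw [List.drop_succ_cons]
          constructor
          · intro hd; exact absurd (List.mem_of_mem_drop hd) hm
          · intro hle; exfalso; push_cast at hle; omega
        · rw [if_neg hw] at h; cases h

-- ---- dict(zip(words, range(n))) is the positive-index fold ----

lemma zip_range_fold_eq_pvPos : ∀ (ws : List String) (i : Int) (d : PySem.Dict String Int),
    (ws.zip (PySem.List.pyRange i (i + (ws.length : Int)) 1)).foldl
        (fun acc p => acc.insert p.1 p.2) d = pvPos ws i d := by
  intro ws
  induction ws with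
  | nil =>
    intro i d
    simp only [List.length_nil, Nat.cast_zero, add_zero]
    rw [PySem.List.pyRange_one_eq_nil (le_refl i)]
    rfl
  | cons x rest ih =>
    intro i d
    have hlt : i < i + ((x :: rest).length : Int) := by
      simp only [List.length_cons]; push_cast; omega
    rw [PySem.List.pyRange_one_cons hlt]
    simp only [List.zip_cons_cons, List.foldl_cons, pvPos]
    have : i + ((x :: rest).length : Int) = (i + 1) + (rest.length : Int) := by
      simp only [List.length_cons]; push_cast; ring
    rw [this]
    exact ih (i + 1) _

-- ---- assembly pieces ----

lemma d0_eq_pvPos (ws : List String) :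
    PySem.Dict.ofList (ws.zip (PySem.List.pyRange 0 (ws.length : Int) 1))
      = pvPos ws 0 PySem.Dict.empty := by
  have h := zip_range_fold_eq_pvPos ws 0 PySem.Dict.empty
  rw [zero_add] at h
  exact h

lemma keys_d0 (ws : List String) :
    (pvPos ws 0 PySem.Dict.empty).keys = PySem.Set.ofList ws := by
  rw [keys_pvPos ws 0 PySem.Dict.empty, PySem.Dict.keys_empty, PySem.Set.update_nil_left]

lemma contains_d0 (ws : List String) (w : String) :
    (pvPos ws 0 PySem.Dict.empty).contains w = true ↔ w ∈ ws := by
  rw [PySem.Dict.contains_iff_mem_keys, keys_d0, PySem.Set.mem_ofList]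

-- the heart of the proof: boundary form of A = zip-dict-then-adjust form of B, keyword present
lemma main_mem (ws : List String) (kw : String) (idx : Nat)
    (hidx : PySem.List.index? ws kw = some idx) :
    pvLoopB (idx : Int) (ws.length : Int) ws 0 PySem.Dict.empty
      = (PySem.List.dedup (ws.drop idx)).foldl
          (fun d w => d.modify w 0 (fun v => v - (ws.length : Int))) (pvPos ws 0 PySem.Dict.empty) := by
  apply PySem.Dict.ext
  have hkeysL : (pvLoopB (idx : Int) (ws.length : Int) ws 0 PySem.Dict.empty).keys
      = PySem.Set.ofList ws := by
    rw [keys_pvLoopB _ _ ws 0 PySem.Dict.empty, PySem.Dict.keys_empty, PySem.Set.update_nil_left]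
  have hkeysR : ((PySem.List.dedup (ws.drop idx)).foldl
      (fun d w => d.modify w 0 (fun v => v - (ws.length : Int))) (pvPos ws 0 PySem.Dict.empty)).keys
      = PySem.Set.ofList ws := by
    rw [PySem.Dict.keys_foldl_modify, keys_d0]
    exact set_update_of_subset _ _ (fun x hx =>
      (PySem.Set.mem_ofList ws x).2 (List.mem_of_mem_drop ((PySem.List.mem_dedup _ x).1 hx)))
  rw [PySem.Dict.items_eq_map_keys _ (by rw [hkeysL]; exact PySem.Set.nodup_ofList ws) (0 : Int),
      PySem.Dict.items_eq_map_keys _ (by rw [hkeysR]; exact PySem.Set.nodup_ofList ws) (0 : Int),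
      hkeysL, hkeysR]
  apply List.map_congr_left
  intro w hw
  have hwmem : w ∈ ws := (PySem.Set.mem_ofList ws w).1 hw
  obtain ⟨j, hj⟩ : ∃ j, pvLastIdx? ws 0 w = some j := by
    cases h : pvLastIdx? ws 0 w with
    | none => exact absurd hwmem ((pvLastIdx?_eq_none_iff ws 0 w).1 h)
    | some j => exact ⟨j, rfl⟩
  have hdrop := pvLastIdx?_drop ws 0 w j idx hj
  rw [zero_add] at hdrop
  have hL := getD_pvLoopB (idx : Int) (ws.length : Int) ws 0 PySem.Dict.empty w
  have hR := getD_modifyFold (ws.length : Int) (PySem.List.dedup (ws.drop idx))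
    (PySem.List.nodup_dedup _) (pvPos ws 0 PySem.Dict.empty) w
  have hP := getD_pvPos ws 0 PySem.Dict.empty w
  rw [hj] at hL hP
  simp only [Option.elim] at hL hP
  rw [hL, hR, hP]
  simp only [PySem.List.mem_dedup, id_eq]
  by_cases hge : (idx : Int) ≤ j
  · rw [if_pos hge, if_pos (hdrop.2 hge)]
  · rw [if_neg hge, if_neg (fun hm => hge (hdrop.1 hm))]

-- keyword absent: the boundary n is never reached, A builds the positive dict too
lemma main_not_mem (ws : List String) :
    pvLoopB (ws.length : Int) (ws.length : Int) ws 0 PySem.Dict.empty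
      = pvPos ws 0 PySem.Dict.empty := by
  apply PySem.Dict.ext
  have hkeysL : (pvLoopB (ws.length : Int) (ws.length : Int) ws 0 PySem.Dict.empty).keys
      = PySem.Set.ofList ws := by
    rw [keys_pvLoopB _ _ ws 0 PySem.Dict.empty, PySem.Dict.keys_empty, PySem.Set.update_nil_left]
  rw [PySem.Dict.items_eq_map_keys _ (by rw [hkeysL]; exact PySem.Set.nodup_ofList ws) (0 : Int),
      PySem.Dict.items_eq_map_keys _ (by rw [keys_d0]; exact PySem.Set.nodup_ofList ws) (0 : Int),
      hkeysL, keys_d0]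
  apply List.map_congr_left
  intro w hw
  have hwmem : w ∈ ws := (PySem.Set.mem_ofList ws w).1 hw
  obtain ⟨j, hj⟩ : ∃ j, pvLastIdx? ws 0 w = some j := by
    cases h : pvLastIdx? ws 0 w with
    | none => exact absurd hwmem ((pvLastIdx?_eq_none_iff ws 0 w).1 h)
    | some j => exact ⟨j, rfl⟩
  have hb := pvLastIdx?_bounds ws 0 w j hj
  have hL := getD_pvLoopB (ws.length : Int) (ws.length : Int) ws 0 PySem.Dict.empty w
  have hP := getD_pvPos ws 0 PySem.Dict.empty w
  rw [hj] at hL hP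
  simp only [Option.elim] at hL hP
  rw [hL, hP]
  simp only [id_eq]
  rw [if_neg (by omega)]

-- ===== VERDICT (by name: the statement is the Claim_ definition above) =====
theorem index_sentence_spec : Claim_equal_index_sentence := by
  intro sentence keyword _
  unfold Spec_index_sentence index_sentence index_sentence_alt
  rw [loopA_false_eq keyword _ (PySem.Str.split₀ sentence) 0 PySem.Dict.empty, zero_add]
  simp only [d0_eq_pvPos]
  by_cases hmem : keyword ∈ PySem.Str.split₀ sentence
  · obtain ⟨idx, hidx⟩ : ∃ idx, PySem.List.index? (PySem.Str.split₀ sentence) keyword = some idx := by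
      cases h : PySem.List.index? (PySem.Str.split₀ sentence) keyword with
      | none => exact absurd hmem ((PySem.List.index?_eq_none_iff _ _).1 h)
      | some idx => exact ⟨idx, rfl⟩
    have hb : pvBoundary (PySem.Str.split₀ sentence) keyword = (idx : Int) := by
      unfold pvBoundary; rw [hidx]; rfl
    rw [if_pos ((contains_d0 _ keyword).2 hmem), hb, hidx]
    rw [show (Option.getD (some idx) 0 : Nat) = idx from rfl,
        PySem.List.slice_from_natCast]
    rw [main_mem (PySem.Str.split₀ sentence) keyword idx hidx]
  · have hidx : PySem.List.index? (PySem.Str.split₀ sentence) keyword = none :=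
      (PySem.List.index?_eq_none_iff _ _).2 hmem
    have hb : pvBoundary (PySem.Str.split₀ sentence) keyword
        = ((PySem.Str.split₀ sentence).length : Int) := by
      unfold pvBoundary; rw [hidx]; rfl
    rw [if_neg (by rw [contains_d0]; exact hmem), hb,
        main_not_mem (PySem.Str.split₀ sentence)]
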